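-- pv_equiv track=rewrite | github.com/mtorres253/morning-automation | skills/job-search/scripts/filter_and_deliver.py | group_jobs_by_category
-- ===== SOURCE A (Python) =====
-- from typing import List, Dict, Any, Tuple
--
-- def group_jobs_by_category(jobs: List[Dict[str, Any]]) -> Dict[str, List[Dict[str, Any]]]:
--     """Group jobs by title category."""
--     groups = {
--         "Director of Product": [],
--         "Principal Product Manager": [],
--         "Chief of Staff": [],
--         "Product Operations": [],
--         "Other": []
--     }
--
--     for job in jobs:
--         title_lower = job["title"].lower()
--         if "director" in title_lower and "product" in title_lower:
--             groups["Director of Product"].append(job)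
--         elif "principal" in title_lower and "product" in title_lower:
--             groups["Principal Product Manager"].append(job)
--         elif "chief of staff" in title_lower:
--             groups["Chief of Staff"].append(job)
--         elif "product operations" in title_lower or "product ops" in title_lower:
--             groups["Product Operations"].append(job)
--         else:
--             groups["Other"].append(job)
--
--     # Remove empty groups
--     return {k: v for k, v in groups.items() if v}
-- ===== SOURCE B (Python) =====
-- from typing import List, Dict, Any
--
-- _RULES = [
--     ("Director of Product", lambda t: "director" in t and "product" in t),
--     ("Principal Product Manager", lambda t: "principal" in t and "product" in t),
--     ("Chief of Staff", lambda t: "chief of staff" in t),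
--     ("Product Operations", lambda t: "product operations" in t or "product ops" in t),
--     ("Other", lambda t: True),
-- ]
--
--
-- def _classify(title):
--     t = title.lower()
--     for name, pred in _RULES:
--         if pred(t):
--             return name
--
--
-- def group_jobs_by_category(jobs: List[Dict[str, Any]]) -> Dict[str, List[Dict[str, Any]]]:
--     """Group jobs by title category (table-driven)."""
--     labels = [_classify(job["title"]) for job in jobs]
--     present = set(labels)
--     return {name: [j for j, l in zip(jobs, labels) if l == name]
--             for name, _ in _RULES if name in present}
-- ===== Notes on version B (the rewrite author's own statement) =====
-- stated objective: alternative
-- what changed: Replaces the pre-initialized five mutable buckets + inline if/elif chain + empty-group filter with a table-driven rule list: labels are computed once per job by a first-matching-rule classifier, and the result dict is assembled per category by a zip/filter comprehension over the labelled jobs, keeping only categories present in the label set.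
import Mathlib
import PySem

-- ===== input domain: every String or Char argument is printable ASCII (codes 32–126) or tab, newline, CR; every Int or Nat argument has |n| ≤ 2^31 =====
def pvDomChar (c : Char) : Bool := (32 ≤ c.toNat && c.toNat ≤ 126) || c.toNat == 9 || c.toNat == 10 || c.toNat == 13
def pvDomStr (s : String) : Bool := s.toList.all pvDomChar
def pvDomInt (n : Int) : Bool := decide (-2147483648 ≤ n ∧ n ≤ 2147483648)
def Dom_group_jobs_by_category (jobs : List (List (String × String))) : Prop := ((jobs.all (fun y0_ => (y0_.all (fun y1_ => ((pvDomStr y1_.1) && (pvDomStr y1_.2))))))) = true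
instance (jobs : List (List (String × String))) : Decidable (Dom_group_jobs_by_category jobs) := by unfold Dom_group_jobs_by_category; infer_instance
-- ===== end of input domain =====

-- B replaces A's five pre-initialized mutable buckets + inline if/elif + empty-group filter with a
-- table-driven rule list: a first-matching-rule classifier labels each job once, and the output is
-- assembled per category by a zip/filter pass in fixed rule order (objective: alternative decomposition).


-- job["title"]: first match in the association list (Python dict lookup); total form, used under Pre_
def pvTitle (job : List (String × String)) : String := (List.lookup "title" job).getD ""

-- ===== PORT A =====
def group_jobs_by_category (jobs : List (List (String × String))) : List (String × List (List (String × String))) :=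
  let groups : PySem.Dict String (List (List (String × String))) :=
    PySem.Dict.ofList [("Director of Product", []), ("Principal Product Manager", []),
      ("Chief of Staff", []), ("Product Operations", []), ("Other", [])]
  let groups := jobs.foldl (fun g job =>
    let t := PySem.Str.lower (pvTitle job)
    if PySem.Str.isIn "director" t && PySem.Str.isIn "product" t then
      g.modify "Director of Product" [] (fun v => v ++ [job])
    else if PySem.Str.isIn "principal" t && PySem.Str.isIn "product" t then
      g.modify "Principal Product Manager" [] (fun v => v ++ [job])
    else if PySem.Str.isIn "chief of staff" t then
      g.modify "Chief of Staff" [] (fun v => v ++ [job])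
    else if PySem.Str.isIn "product operations" t || PySem.Str.isIn "product ops" t then
      g.modify "Product Operations" [] (fun v => v ++ [job])
    else
      g.modify "Other" [] (fun v => v ++ [job])) groups
  groups.items.filter (fun kv => !kv.2.isEmpty)

-- ===== PORT B =====
def pvRules : List (String × (String → Bool)) :=
  [("Director of Product", fun t => PySem.Str.isIn "director" t && PySem.Str.isIn "product" t),
   ("Principal Product Manager", fun t => PySem.Str.isIn "principal" t && PySem.Str.isIn "product" t),
   ("Chief of Staff", fun t => PySem.Str.isIn "chief of staff" t),
   ("Product Operations", fun t => PySem.Str.isIn "product operations" t || PySem.Str.isIn "product ops" t),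
   ("Other", fun _ => true)]

-- first rule whose predicate matches; the last rule always matches, so the default is unreachable
def pvClassify (title : String) : String :=
  let t := PySem.Str.lower title
  ((pvRules.find? (fun r => r.2 t)).map (fun r => r.1)).getD ""

def group_jobs_by_category_alt (jobs : List (List (String × String))) : List (String × List (List (String × String))) :=
  let labels := jobs.map (fun job => pvClassify (pvTitle job))
  let present := PySem.Set.ofList labels
  pvRules.filterMap (fun r =>
    if PySem.Set.contains present r.1 then
      some (r.1, ((jobs.zip labels).filter (fun jl => jl.2 == r.1)).map (fun jl => jl.1))
    else none)

-- ===== PRECONDITION & SPEC =====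
-- Pre_ excludes jobs missing a "title" key: there Python A raises KeyError (B raises too)
def Pre_group_jobs_by_category (jobs : List (List (String × String))) : Prop :=
  (jobs.all (fun job => job.any (fun kv => kv.1 == "title"))) = true
instance (jobs : List (List (String × String))) : Decidable (Pre_group_jobs_by_category jobs) := by unfold Pre_group_jobs_by_category; infer_instance
def pvWitness_group_jobs_by_category : (List (List (String × String))) :=
  [[("title", "Director of Product"), ("url", "u")], [("title", "barista")]]

def Spec_group_jobs_by_category (jobs : List (List (String × String))) (out : List (String × List (List (String × String)))) : Prop := out = group_jobs_by_category_alt jobs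
instance (jobs : List (List (String × String))) (out : List (String × List (List (String × String)))) : Decidable (Spec_group_jobs_by_category jobs out) := by unfold Spec_group_jobs_by_category; infer_instance

-- ===== CLAIM (what is proved, stated in full; the proofs are below) =====
def Claim_equal_group_jobs_by_category : Prop := ∀ (jobs : List (List (String × String))), Dom_group_jobs_by_category jobs → Pre_group_jobs_by_category jobs → Spec_group_jobs_by_category jobs (group_jobs_by_category jobs)

-- ===== LEMMAS AND PROOFS =====

-- A's if/elif chain picks exactly the category pvClassify picks
theorem pvBodyA_eq (g : PySem.Dict String (List (List (String × String)))) (job : List (String × String)) :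
    (let t := PySem.Str.lower (pvTitle job)
     if PySem.Str.isIn "director" t && PySem.Str.isIn "product" t then
       g.modify "Director of Product" [] (fun v => v ++ [job])
     else if PySem.Str.isIn "principal" t && PySem.Str.isIn "product" t then
       g.modify "Principal Product Manager" [] (fun v => v ++ [job])
     else if PySem.Str.isIn "chief of staff" t then
       g.modify "Chief of Staff" [] (fun v => v ++ [job])
     else if PySem.Str.isIn "product operations" t || PySem.Str.isIn "product ops" t then
       g.modify "Product Operations" [] (fun v => v ++ [job])
     else
       g.modify "Other" [] (fun v => v ++ [job]))
    = g.modify (pvClassify (pvTitle job)) [] (fun v => v ++ [job]) := by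
  simp only [pvClassify, pvRules, List.find?]
  cases h1 : PySem.Str.isIn "director" (PySem.Str.lower (pvTitle job)) && PySem.Str.isIn "product" (PySem.Str.lower (pvTitle job)) <;>
  cases h2 : PySem.Str.isIn "principal" (PySem.Str.lower (pvTitle job)) && PySem.Str.isIn "product" (PySem.Str.lower (pvTitle job)) <;>
  cases h3 : PySem.Str.isIn "chief of staff" (PySem.Str.lower (pvTitle job)) <;>
  cases h4 : PySem.Str.isIn "product operations" (PySem.Str.lower (pvTitle job)) || PySem.Str.isIn "product ops" (PySem.Str.lower (pvTitle job)) <;>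
  simp only [h1, h2, h3, h4, if_true, if_false, Bool.false_eq_true, Bool.true_eq_false, ite_true, ite_false, Option.map_some, Option.getD_some] <;> rfl

theorem pvClassify_mem (title : String) :
    pvClassify title ∈ ["Director of Product", "Principal Product Manager", "Chief of Staff",
      "Product Operations", "Other"] := by
  simp only [pvClassify, pvRules, List.find?]
  cases h1 : PySem.Str.isIn "director" (PySem.Str.lower title) && PySem.Str.isIn "product" (PySem.Str.lower title) <;>
  cases h2 : PySem.Str.isIn "principal" (PySem.Str.lower title) && PySem.Str.isIn "product" (PySem.Str.lower title) <;>
  cases h3 : PySem.Str.isIn "chief of staff" (PySem.Str.lower title) <;>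
  cases h4 : PySem.Str.isIn "product operations" (PySem.Str.lower title) || PySem.Str.isIn "product ops" (PySem.Str.lower title) <;>
  simp [h1, h2, h3, h4]

theorem pv_zip_filter (jobs : List (List (String × String))) (f : List (String × String) → String) (n : String) :
    ((jobs.zip (jobs.map f)).filter (fun jl => jl.2 == n)).map (fun jl => jl.1)
      = jobs.filter (fun j => f j == n) := by
  induction jobs with
  | nil => rfl
  | cons j rest ih =>
    simp only [List.map_cons, List.zip_cons_cons, List.filter_cons]
    by_cases h : f j = n <;> simp [h, ih]

theorem pv_present_iff (jobs : List (List (String × String))) (f : List (String × String) → String) (n : String) :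
    PySem.Set.contains (PySem.Set.ofList (jobs.map f)) n = !(jobs.filter (fun j => f j == n)).isEmpty := by
  simp only [PySem.Set.contains]
  rw [Bool.eq_iff_iff]
  simp only [List.contains_iff_mem, PySem.Set.mem_ofList, List.mem_map, Bool.not_eq_eq_eq_not,
    Bool.not_true, List.isEmpty_eq_false_iff, ne_eq, List.filter_eq_nil_iff, beq_iff_eq, not_forall]
  constructor
  · rintro ⟨x, hx, hfx⟩; exact ⟨x, hx, by simp [hfx]⟩
  · rintro ⟨x, hx, hfx⟩; exact ⟨x, hx, by simpa using hfx⟩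

-- the grouping loop, rephrased through pvBodyA_eq: value accumulated at key c
theorem pv_getD_fold (jobs : List (List (String × String))) (d : PySem.Dict String (List (List (String × String)))) (c : String) :
    (jobs.foldl (fun g job => g.modify (pvClassify (pvTitle job)) [] (fun v => v ++ [job])) d).getD c []
      = d.getD c [] ++ jobs.filter (fun j => pvClassify (pvTitle j) == c) := by
  induction jobs generalizing d with
  | nil => simp
  | cons j rest ih =>
    simp only [List.foldl_cons, List.filter_cons, ih]
    by_cases h : pvClassify (pvTitle j) = c
    · simp [PySem.Dict.getD_modify, h]
    · simp [PySem.Dict.getD_modify, h, Ne.symm h]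

theorem pv_keys_fold (jobs : List (List (String × String))) (d : PySem.Dict String (List (List (String × String))))
    (h : ∀ j : List (String × String), pvClassify (pvTitle j) ∈ d.keys) :
    (jobs.foldl (fun g job => g.modify (pvClassify (pvTitle job)) [] (fun v => v ++ [job])) d).keys = d.keys := by
  induction jobs generalizing d with
  | nil => rfl
  | cons j rest ih =>
    have hc : d.contains (pvClassify (pvTitle j)) = true :=
      (PySem.Dict.contains_iff_mem_keys _ _).mpr (h j)
    have hk : (d.modify (pvClassify (pvTitle j)) [] (fun v => v ++ [j])).keys = d.keys := by
      simp [PySem.Dict.keys_modify, PySem.Dict.keys_insert_of_contains, hc]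
    simp only [List.foldl_cons]
    rw [ih _ (fun j' => by rw [hk]; exact h j'), hk]

-- ===== VERDICT (by name: the statement is the Claim_ definition above) =====
theorem group_jobs_by_category_spec : Claim_equal_group_jobs_by_category := by
  intro jobs _ _
  show group_jobs_by_category jobs = group_jobs_by_category_alt jobs
  simp only [group_jobs_by_category, group_jobs_by_category_alt]
  rw [PySem.List.foldl_congr_mem jobs _ _ _ (fun acc x _ => pvBodyA_eq acc x)]
  have h5 : (PySem.Dict.ofList [("Director of Product", ([] : List (List (String × String)))),
      ("Principal Product Manager", []), ("Chief of Staff", []), ("Product Operations", []),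
      ("Other", [])]).keys
      = ["Director of Product", "Principal Product Manager", "Chief of Staff",
         "Product Operations", "Other"] := by decide
  have hkeys := pv_keys_fold jobs
    (PySem.Dict.ofList [("Director of Product", []), ("Principal Product Manager", []),
      ("Chief of Staff", []), ("Product Operations", []), ("Other", [])])
    (fun j => by rw [h5]; exact pvClassify_mem (pvTitle j))
  have hnd : (jobs.foldl (fun g job => g.modify (pvClassify (pvTitle job)) [] (fun v => v ++ [job]))
      (PySem.Dict.ofList [("Director of Product", []), ("Principal Product Manager", []),
        ("Chief of Staff", []), ("Product Operations", []), ("Other", [])])).keys.Nodup := by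
    rw [hkeys, h5]; decide
  rw [PySem.Dict.items_eq_map_keys _ hnd [], hkeys, h5]
  have hg : ∀ c, (PySem.Dict.ofList [("Director of Product", ([] : List (List (String × String)))),
      ("Principal Product Manager", []), ("Chief of Staff", []), ("Product Operations", []),
      ("Other", [])]).getD c [] = [] := by
    intro c
    rcases PySem.Dict.getD_eq_get?_getD (PySem.Dict.ofList [("Director of Product",
      ([] : List (List (String × String)))), ("Principal Product Manager", []), ("Chief of Staff", []),
      ("Product Operations", []), ("Other", [])]) c ([] : List (List (String × String))) with h
    rw [h]
    rcases hq : PySem.Dict.get? (PySem.Dict.ofList [("Director of Product",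
      ([] : List (List (String × String)))), ("Principal Product Manager", []), ("Chief of Staff", []),
      ("Product Operations", []), ("Other", [])]) c with _ | v
    · rfl
    · have := PySem.Dict.mem_items_of_get?_eq_some _ hq
      simp only [PySem.Dict.items] at this
      fin_cases this <;> rfl
  simp only [List.map_cons, List.map_nil, pv_getD_fold, hg, List.nil_append]
  simp only [pvRules, List.filterMap, pv_present_iff, pv_zip_filter]
  simp only [List.filter_cons, List.filter_nil]
  split_ifs <;> rfl
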